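-- pv_equiv track=rewrite | github.com/Wertyhan/ISAAC | isaac_eval/metrics.py | _check_image_hit
-- ===== SOURCE A (Python) =====
-- from typing import List, Dict, Any, Optional, Set
--
-- def _check_image_hit(
--
--     expected_images: Set[str],
--     retrieved_image_ids: Set[str],
-- ) -> bool:
--     """Check if any expected image was retrieved."""
--     for exp_img in expected_images:
--         exp_lower = exp_img.lower()
--         for img_id in retrieved_image_ids:
--             # Direct match or partial match
--             if exp_lower in img_id or img_id in exp_lower:
--                 return True
--             # Word-level matching for multi-word patterns
--             exp_words = set(exp_lower.replace('_', ' ').replace('-', ' ').split())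
--             img_words = set(img_id.replace('_', ' ').replace('-', ' ').split())
--             if exp_words & img_words:
--                 return True
--     return False
-- ===== SOURCE B (Python) =====
-- def _check_image_hit(
--     expected_images,
--     retrieved_image_ids,
-- ) -> bool:
--     """Check if any expected image was retrieved."""
--     # One-time word index: union of word sets of all retrieved ids (raw, not lowercased).
--     retrieved_words = set()
--     for img_id in retrieved_image_ids:
--         retrieved_words.update(img_id.replace('_', ' ').replace('-', ' ').split())
--     for exp_img in expected_images:
--         exp_lower = exp_img.lower()
--         if any(exp_lower in img_id or img_id in exp_lower for img_id in retrieved_image_ids):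
--             return True
--         if any(w in retrieved_words for w in exp_lower.replace('_', ' ').replace('-', ' ').split()):
--             return True
--     return False
-- ===== Notes on version B (the rewrite author's own statement) =====
-- stated objective: alternative
-- what changed: B precomputes a single word-index set (union of all retrieved ids' word sets) once, then runs two separate passes per expected image (a substring pass over the ids and a word pass over the prebuilt index), instead of A's fused pairwise loop that rebuilds both word sets inside the inner loop.
import Mathlib
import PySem

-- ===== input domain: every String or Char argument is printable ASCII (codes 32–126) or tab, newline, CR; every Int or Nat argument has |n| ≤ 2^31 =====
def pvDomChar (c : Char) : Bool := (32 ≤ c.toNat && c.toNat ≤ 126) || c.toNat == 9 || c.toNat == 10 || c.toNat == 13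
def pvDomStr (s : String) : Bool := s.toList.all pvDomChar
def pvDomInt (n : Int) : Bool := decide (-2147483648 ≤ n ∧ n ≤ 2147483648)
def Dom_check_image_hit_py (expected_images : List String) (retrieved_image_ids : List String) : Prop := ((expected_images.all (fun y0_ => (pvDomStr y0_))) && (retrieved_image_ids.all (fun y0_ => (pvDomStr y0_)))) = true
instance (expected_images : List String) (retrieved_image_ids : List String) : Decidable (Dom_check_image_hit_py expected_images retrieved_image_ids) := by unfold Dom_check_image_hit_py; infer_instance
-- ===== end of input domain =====

-- B precomputes one word-index set over the retrieved ids and does two separate passes,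
-- instead of A's fused pairwise loop rebuilding both word sets in the inner loop (objective: alternative).

-- id.replace('_',' ').replace('-',' ').split()  (shared literal helper of both ports)
def pvWords (s : String) : List String :=
  PySem.Str.split₀ (PySem.Str.replace (PySem.Str.replace s "_" " ") "-" " ")

-- ===== PORT A =====
def check_image_hit_py (expected_images : List String) (retrieved_image_ids : List String) : Bool :=
  expected_images.any (fun exp_img =>
    let exp_lower := PySem.Str.lower exp_img
    retrieved_image_ids.any (fun img_id =>
      if PySem.Str.isIn exp_lower img_id || PySem.Str.isIn img_id exp_lower then true
      else
        let exp_words : PySem.Set String := PySem.Set.ofList (pvWords exp_lower)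
        let img_words : PySem.Set String := PySem.Set.ofList (pvWords img_id)
        !(PySem.Set.inter exp_words img_words).isEmpty))

-- ===== PORT B =====
def check_image_hit_py_alt (expected_images : List String) (retrieved_image_ids : List String) : Bool :=
  let retrieved_words : PySem.Set String :=
    retrieved_image_ids.foldl (fun s img_id => PySem.Set.update s (pvWords img_id)) PySem.Set.empty
  expected_images.any (fun exp_img =>
    let exp_lower := PySem.Str.lower exp_img
    (retrieved_image_ids.any (fun img_id =>
        PySem.Str.isIn exp_lower img_id || PySem.Str.isIn img_id exp_lower))
    || (pvWords exp_lower).any (fun w => PySem.Set.contains retrieved_words w))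

-- ===== PRECONDITION & SPEC =====
def Spec_check_image_hit_py (expected_images : List String) (retrieved_image_ids : List String) (out : Bool) : Prop := out = check_image_hit_py_alt expected_images retrieved_image_ids
instance (expected_images : List String) (retrieved_image_ids : List String) (out : Bool) : Decidable (Spec_check_image_hit_py expected_images retrieved_image_ids out) := by unfold Spec_check_image_hit_py; infer_instance

-- ===== CLAIM (what is proved, stated in full; the proofs are below) =====
def Claim_equal_check_image_hit_py : Prop := ∀ (expected_images : List String) (retrieved_image_ids : List String), Dom_check_image_hit_py expected_images retrieved_image_ids → Spec_check_image_hit_py expected_images retrieved_image_ids (check_image_hit_py expected_images retrieved_image_ids)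

-- ===== LEMMAS AND PROOFS =====

-- membership in the foldl-built word index = some retrieved id contains the word
theorem mem_word_index (r : List String) (s : PySem.Set String) (w : String) :
    (w ∈ r.foldl (fun s img_id => PySem.Set.update s (pvWords img_id)) s) ↔
      (w ∈ s ∨ ∃ i ∈ r, w ∈ pvWords i) := by
  induction r generalizing s with
  | nil => simp
  | cons i r ih =>
    simp only [List.foldl_cons, ih, PySem.Set.mem_update, List.mem_cons]
    constructor
    · rintro (⟨h | h⟩ | ⟨j, hj, hw⟩)
      · exact Or.inl h
      · exact Or.inr ⟨i, Or.inl rfl, h⟩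
      · exact Or.inr ⟨j, Or.inr hj, hw⟩
    · rintro (h | ⟨j, (rfl | hj), hw⟩)
      · exact Or.inl (Or.inl h)
      · exact Or.inl (Or.inr hw)
      · exact Or.inr ⟨j, hj, hw⟩

-- python-truthiness of the intersection of the two word sets = ∃ shared word
theorem inter_nonempty_iff (xs ys : List String) :
    (!(PySem.Set.inter (PySem.Set.ofList xs) (PySem.Set.ofList ys)).isEmpty) = true ↔
      ∃ w ∈ xs, w ∈ ys := by
  rw [Bool.not_eq_eq_eq_not, Bool.not_true, List.isEmpty_eq_false_iff_exists_mem]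
  constructor
  · rintro ⟨w, hw⟩
    rw [PySem.Set.mem_inter, PySem.Set.mem_ofList, PySem.Set.mem_ofList] at hw
    exact ⟨w, hw.1, hw.2⟩
  · rintro ⟨w, h1, h2⟩
    exact ⟨w, by rw [PySem.Set.mem_inter, PySem.Set.mem_ofList, PySem.Set.mem_ofList]; exact ⟨h1, h2⟩⟩

-- ===== VERDICT (by name: the statement is the Claim_ definition above) =====
theorem check_image_hit_py_spec : Claim_equal_check_image_hit_py := by
  intro E R _
  unfold Spec_check_image_hit_py check_image_hit_py check_image_hit_py_alt
  rw [Bool.eq_iff_iff]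
  simp only [List.any_eq_true, Bool.or_eq_true, Bool.if_true_left, decide_eq_true_eq, PySem.Set.contains_iff,
    mem_word_index, inter_nonempty_iff]
  constructor
  · rintro ⟨e, he, i, hi, hsub | ⟨w, hw1, hw2⟩⟩
    · exact ⟨e, he, Or.inl ⟨i, hi, hsub⟩⟩
    · exact ⟨e, he, Or.inr ⟨w, hw1, Or.inr ⟨i, hi, hw2⟩⟩⟩
  · rintro ⟨e, he, ⟨i, hi, hsub⟩ | ⟨w, hw1, h | ⟨i, hi, hw2⟩⟩⟩
    · exact ⟨e, he, i, hi, Or.inl hsub⟩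
    · simp [PySem.Set.empty] at h
    · exact ⟨e, he, i, hi, Or.inr ⟨w, hw1, hw2⟩⟩
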